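-- pv_equiv track=rewrite | github.com/patrickfrey/strusWikipediaSearch | scripts/strusnlp_spacy.py | getMaxSexCount
-- ===== SOURCE A (Python) =====
-- def getMaxSexCount( sexCountMap):
--     rt = None
--     max = 0
--     values = []
--     for sex,cnt in sexCountMap.items():
--         values.append( cnt)
--         if cnt > max:
--             max = cnt
--             rt = sex
--     values.sort( reverse=True)
--     if len(values) >= 2 and values[0] <= values[1] * 2 + 1.0:
--         return None
--     if len(values) == 1 and values[0] <= 5.0:
--         return None
--     return rt
-- ===== SOURCE B (Python) =====
-- def getMaxSexCount(sexCountMap):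
--     rt = None
--     best = 0
--     top1 = None
--     top2 = None
--     for sex, cnt in sexCountMap.items():
--         if cnt > best:
--             best = cnt
--             rt = sex
--         if top1 is None:
--             top1 = cnt
--         elif cnt > top1:
--             top1, top2 = cnt, top1
--         elif top2 is None or cnt > top2:
--             top2 = cnt
--     if top2 is not None:
--         if top1 <= top2 * 2 + 1:
--             return None
--     elif top1 is not None:
--         if top1 <= 5:
--             return None
--     return rt
-- ===== Notes on version B (the rewrite author's own statement) =====
-- stated objective: alternative
-- what changed: B drops the values list and the descending sort, tracking the two largest counts (top1/top2) in the single O(n) pass over the items; the ratio guards are then applied to top1/top2 directly.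
import Mathlib
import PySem

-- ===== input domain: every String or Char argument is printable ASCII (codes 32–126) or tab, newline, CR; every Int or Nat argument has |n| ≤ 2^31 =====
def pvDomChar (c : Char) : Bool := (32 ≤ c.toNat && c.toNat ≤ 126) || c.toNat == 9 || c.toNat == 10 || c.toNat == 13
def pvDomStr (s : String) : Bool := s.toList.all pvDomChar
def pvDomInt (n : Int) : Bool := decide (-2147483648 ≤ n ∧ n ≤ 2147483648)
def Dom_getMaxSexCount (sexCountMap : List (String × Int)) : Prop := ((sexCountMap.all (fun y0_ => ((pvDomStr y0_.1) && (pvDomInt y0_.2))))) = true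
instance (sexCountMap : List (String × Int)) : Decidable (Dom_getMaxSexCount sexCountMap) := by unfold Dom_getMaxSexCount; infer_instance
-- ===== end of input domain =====

-- B replaces A's values list + descending sort by single-pass tracking of the two
-- largest counts; the ratio guards are applied to those directly (objective: alternative).

-- ===== PORT A =====
-- loop state: (rt, max, values); then values.sort(reverse=True) and the two guards.
-- The float comparisons 'values[0] <= values[1]*2 + 1.0' and 'values[0] <= 5.0' are
-- exact integer comparisons on the stated |n| ≤ 2^31 domain.
def getMaxSexCount (sexCountMap : List (String × Int)) : Option String :=
  let st := sexCountMap.foldl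
    (fun (s : Option String × Int × List Int) p =>
      let values := s.2.2 ++ [p.2]
      if p.2 > s.2.1 then (some p.1, p.2, values) else (s.1, s.2.1, values))
    (none, 0, [])
  let values := PySem.List.sorted st.2.2 (fun x => x) true
  if values.length ≥ 2 ∧ values[0]! ≤ values[1]! * 2 + 1 then none
  else if values.length = 1 ∧ values[0]! ≤ 5 then none
  else st.1

-- ===== PORT B =====
-- top-two tracking step: top1/top2 are the largest and second largest count seen so far.
def topStep : Option Int × Option Int → Int → Option Int × Option Int
  | (none, _), c => (some c, none)
  | (some a, t2), c =>
    if c > a then (some c, some a)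
    else
      match t2 with
      | none => (some a, some c)
      | some b => if c > b then (some a, some c) else (some a, some b)

def getMaxSexCount_alt (sexCountMap : List (String × Int)) : Option String :=
  let st := sexCountMap.foldl
    (fun (s : (Option String × Int) × Option Int × Option Int) p =>
      let rb := if p.2 > s.1.2 then (some p.1, p.2) else s.1
      (rb, topStep s.2 p.2))
    ((none, 0), (none, none))
  match st.2 with
  | (some a, some b) => if a ≤ b * 2 + 1 then none else st.1.1
  | (some a, none) => if a ≤ 5 then none else st.1.1
  | (none, _) => st.1.1

-- ===== PRECONDITION & SPEC =====
def Spec_getMaxSexCount (sexCountMap : List (String × Int)) (out : Option String) : Prop := out = getMaxSexCount_alt sexCountMap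
instance (sexCountMap : List (String × Int)) (out : Option String) : Decidable (Spec_getMaxSexCount sexCountMap out) := by unfold Spec_getMaxSexCount; infer_instance

-- ===== CLAIM (what is proved, stated in full; the proofs are below) =====
def Claim_equal_getMaxSexCount : Prop := ∀ (sexCountMap : List (String × Int)), Dom_getMaxSexCount sexCountMap → Spec_getMaxSexCount sexCountMap (getMaxSexCount sexCountMap)

-- ===== LEMMAS AND PROOFS =====

-- A's fold splits into the (rt, max) tracker and the plain list of counts.
theorem foldA_split (m : List (String × Int)) :
    ∀ (r : Option String) (mx : Int) (vs : List Int),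
    m.foldl
      (fun (s : Option String × Int × List Int) p =>
        let values := s.2.2 ++ [p.2]
        if p.2 > s.2.1 then (some p.1, p.2, values) else (s.1, s.2.1, values))
      (r, mx, vs)
    = (let rb := m.foldl (fun (s : Option String × Int) p =>
          if p.2 > s.2 then (some p.1, p.2) else s) (r, mx)
       (rb.1, rb.2, vs ++ m.map Prod.snd)) := by
  induction m with
  | nil => intro r mx vs; simp
  | cons p t ih =>
      intro r mx vs
      by_cases h : p.2 > mx <;> simp [h, ih, List.append_assoc]

-- B's fold splits into the same (rt, max) tracker and the top-two fold over the counts.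
theorem foldB_split (m : List (String × Int)) :
    ∀ (r : Option String) (mx : Int) (t : Option Int × Option Int),
    m.foldl
      (fun (s : (Option String × Int) × Option Int × Option Int) p =>
        let rb := if p.2 > s.1.2 then (some p.1, p.2) else s.1
        (rb, topStep s.2 p.2))
      ((r, mx), t)
    = (m.foldl (fun (s : Option String × Int) p =>
          if p.2 > s.2 then (some p.1, p.2) else s) (r, mx),
       (m.map Prod.snd).foldl topStep t) := by
  induction m with
  | nil => intro r mx t; simp
  | cons p tl ih =>
      intro r mx t
      by_cases h : p.2 > mx <;> simp [h, ih]

theorem topStep_comm (s : Option Int × Option Int) (a b : Int) :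
    topStep (topStep s a) b = topStep (topStep s b) a := by
  rcases s with ⟨_ | x, _ | y⟩ <;>
    simp only [topStep] <;> (try split_ifs) <;>
    (try simp only [topStep]) <;> (try split_ifs) <;>
    (try simp_all) <;> omega

theorem foldTop_perm {l₁ l₂ : List Int} (h : l₁.Perm l₂) :
    ∀ s, l₁.foldl topStep s = l₂.foldl topStep s := by
  induction h with
  | nil => intro s; rfl
  | cons x _ ih => intro s; simp [ih]
  | swap x y l => intro s; simp [topStep_comm]
  | trans _ _ ih1 ih2 => intro s; rw [ih1, ih2]

-- once the state holds the top two, smaller elements leave it unchanged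
theorem foldTop_keep (rest : List Int) :
    ∀ (a b : Int), b ≤ a → (∀ c ∈ rest, c ≤ b) →
    rest.foldl topStep (some a, some b) = (some a, some b) := by
  induction rest with
  | nil => intros; rfl
  | cons c t ih =>
      intro a b hba hall
      have hc : c ≤ b := hall c (by simp)
      have h1 : ¬ c > a := by omega
      have h2 : ¬ c > b := by omega
      simp only [List.foldl_cons, topStep, h1, h2, if_false]
      exact ih a b hba (fun x hx => hall x (by simp [hx]))

-- the top-two fold over a list reads off the first two elements of its descending sort
theorem foldTop_sorted (l : List Int) :
    l.foldl topStep (none, none) =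
      (let s := PySem.List.sorted l (fun x => x) true
       match s with
       | [] => (none, none)
       | [a] => (some a, none)
       | a :: b :: _ => (some a, some b)) := by
  have hperm : (PySem.List.sorted l (fun x => x) true).Perm l :=
    PySem.List.sorted_perm l (fun x => x) true
  rw [foldTop_perm hperm.symm]
  rcases hs : PySem.List.sorted l (fun x => x) true with _ | ⟨a, _ | ⟨b, rest⟩⟩
  · rfl
  · rfl
  · have hpw : (PySem.List.sorted l (fun x => x) true).Pairwise (fun x y => y ≤ x) :=
      PySem.List.sorted_pairwise_rev l (fun x => x)
    rw [hs] at hpw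
    have hba : b ≤ a := (List.pairwise_cons.1 hpw).1 b (by simp)
    have hrest : ∀ c ∈ rest, c ≤ b :=
      (List.pairwise_cons.1 (List.pairwise_cons.1 hpw).2).1
    have h1 : ¬ b > a := by omega
    simp only [List.foldl_cons, topStep, h1, if_false]
    exact foldTop_keep rest a b hba hrest

-- ===== VERDICT (by name: the statement is the Claim_ definition above) =====
theorem getMaxSexCount_spec : Claim_equal_getMaxSexCount := by
  intro m _
  unfold Spec_getMaxSexCount getMaxSexCount getMaxSexCount_alt
  rw [foldA_split, foldB_split, foldTop_sorted]
  rcases hs : PySem.List.sorted (m.map Prod.snd) (fun x => x) true with _ | ⟨a, _ | ⟨b, rest⟩⟩ <;>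
    simp_all
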